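-- pv_equiv track=rewrite | github.com/Xvedk/GFG-ALL | POTD/15-11-2023.py | betterString
-- ===== SOURCE A (Python) =====
-- def betterString(str1, str2):
--     mod = 10**9 + 7
--
--     def countDistinctSubsequences(s):
--         lastOccurrence = {}
--         dp = [0] * (len(s) + 1)
--         dp[0] = 1
--
--         for i, char in enumerate(s):
--             dp[i + 1] = (2 * dp[i]) % mod
--             if char in lastOccurrence:
--                 dp[i + 1] = (dp[i + 1] - dp[lastOccurrence[char]] + mod) % mod
--             lastOccurrence[char] = i
--
--         return dp[-1] - 1  # Subtract 1 to exclude the empty subsequence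
--
--     count1 = countDistinctSubsequences(str1)
--     count2 = countDistinctSubsequences(str2)
--
--     return str1 if count1 >= count2 else str2
-- ===== SOURCE B (Python) =====
-- def betterString(str1, str2):
--     mod = 10**9 + 7
--
--     def countDistinct(s):
--         # ending[c] = number of distinct subsequences ending with character c (mod)
--         ending = {}
--         for ch in s:
--             ending[ch] = (1 + sum(ending.values())) % mod
--         return (1 + sum(ending.values())) % mod - 1
--
--     return str1 if countDistinct(str1) >= countDistinct(str2) else str2
-- ===== Notes on version B (the rewrite author's own statement) =====
-- stated objective: simpler
-- what changed: Replaced the O(n) prefix dp array plus last-occurrence index dict (inclusion-exclusion on the previous occurrence) by the 'subsequences ending with each character' DP: a dict from char to the count of distinct subsequences ending with that char, with the answer read off as 1 + sum of its values.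
import Mathlib
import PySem

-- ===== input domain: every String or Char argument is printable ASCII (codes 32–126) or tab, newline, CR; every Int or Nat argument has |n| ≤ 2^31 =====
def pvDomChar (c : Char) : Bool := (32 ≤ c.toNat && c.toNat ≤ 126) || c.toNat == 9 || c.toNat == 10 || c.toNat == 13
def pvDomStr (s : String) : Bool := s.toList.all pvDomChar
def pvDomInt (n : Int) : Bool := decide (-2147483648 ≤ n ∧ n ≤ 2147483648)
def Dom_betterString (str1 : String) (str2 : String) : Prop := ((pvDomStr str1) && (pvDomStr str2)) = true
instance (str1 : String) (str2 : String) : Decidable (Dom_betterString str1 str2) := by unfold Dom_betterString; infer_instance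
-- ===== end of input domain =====

-- B replaces A's prefix dp array + last-occurrence index dict by a dict counting the
-- distinct subsequences ending with each character (objective: simpler).

def pvMod : Int := 1000000007

-- ===== PORT A =====
-- loop body of A's 'for i, char in enumerate(s)' (dp[i+1] assigned, possibly reassigned, then lastOccurrence[char] = i)
def pvStepA (st : List Int × PySem.Dict Char Int) (p : Int × Char) : List Int × PySem.Dict Char Int :=
  let dp1 := PySem.List.pySetD st.1 (p.1 + 1) (PySem.Int.mod (2 * PySem.List.pyGetD st.1 p.1 0) pvMod)
  let dp2 := match st.2.get? p.2 with
    | some j => PySem.List.pySetD dp1 (p.1 + 1)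
        (PySem.Int.mod (PySem.List.pyGetD dp1 (p.1 + 1) 0 - PySem.List.pyGetD dp1 j 0 + pvMod) pvMod)
    | none => dp1
  (dp2, st.2.insert p.2 p.1)

-- countDistinctSubsequences of A; all list indices used are in range, so pyGetD/pySetD are exact
def pvCountA (s : String) : Int :=
  let chars := s.toList
  let dp0 := PySem.List.pySetD (List.replicate (chars.length + 1) (0 : Int)) 0 1
  let st := (PySem.List.enumerate chars).foldl pvStepA (dp0, PySem.Dict.empty)
  PySem.List.pyGetD st.1 (-1) 0 - 1

def betterString (str1 : String) (str2 : String) : String :=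
  if pvCountA str1 ≥ pvCountA str2 then str1 else str2

-- ===== PORT B =====
def pvSum (d : PySem.Dict Char Int) : Int := d.values.foldl (· + ·) 0

-- loop body of B's 'for ch in s': ending[ch] = (1 + sum(ending.values())) % mod
def pvStepB (d : PySem.Dict Char Int) (c : Char) : PySem.Dict Char Int :=
  d.insert c (PySem.Int.mod (1 + pvSum d) pvMod)

def pvCountB (s : String) : Int :=
  let ending := s.toList.foldl pvStepB PySem.Dict.empty
  PySem.Int.mod (1 + pvSum ending) pvMod - 1

def betterString_alt (str1 : String) (str2 : String) : String :=
  if pvCountB str1 ≥ pvCountB str2 then str1 else str2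

-- ===== PRECONDITION & SPEC =====
def Spec_betterString (str1 : String) (str2 : String) (out : String) : Prop := out = betterString_alt str1 str2
instance (str1 : String) (str2 : String) (out : String) : Decidable (Spec_betterString str1 str2 out) := by unfold Spec_betterString; infer_instance

-- ===== CLAIM (what is proved, stated in full; the proofs are below) =====
def Claim_equal_betterString : Prop := ∀ (str1 : String) (str2 : String), Dom_betterString str1 str2 → Spec_betterString str1 str2 (betterString str1 str2)

-- ===== LEMMAS AND PROOFS =====

lemma pvSum_eq (d : PySem.Dict Char Int) : pvSum d = (d.items.map Prod.snd).sum := by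
  rw [pvSum, PySem.Dict.values, List.sum_eq_foldl]

lemma pvSum_insert_not_contains (d : PySem.Dict Char Int) (c : Char) (v : Int)
    (h : d.contains c = false) : pvSum (d.insert c v) = pvSum d + v := by
  rw [pvSum_eq, pvSum_eq, PySem.Dict.items_insert_of_not_contains d v h]
  simp

lemma pv_sum_overwrite (c : Char) (v : Int) : ∀ (l : List (Char × Int)) (w : Int),
    (l.map Prod.fst).Nodup → (PySem.Dict.mk l).get? c = some w →
    ((l.map (fun p => if p.1 == c then (c, v) else p)).map Prod.snd).sum
      = (l.map Prod.snd).sum - w + v := by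
  intro l
  induction l with
  | nil => intro w _ hw; simp [PySem.Dict.get?] at hw
  | cons p t ih =>
    intro w hnd hw
    obtain ⟨k, u⟩ := p
    rw [PySem.Dict.get?_mk_cons] at hw
    simp only [List.map_cons, List.nodup_cons] at hnd
    by_cases hkc : (k == c) = true
    · rw [if_pos hkc] at hw
      obtain rfl : u = w := by simpa using hw
      have hkc' : k = c := by simpa using hkc
      have ht : t.map (fun p => if p.1 == c then (c, v) else p) = t := by
        have hq : ∀ q ∈ t, (fun p => if p.1 == c then (c, v) else p) q = id q := by
          intro q hq
          have hqc : q.1 ≠ c := by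
            intro h
            exact hnd.1 (by rw [hkc', ← h]; exact List.mem_map_of_mem hq)
          simp [hqc]
        rw [List.map_congr_left hq, List.map_id]
      simp only [List.map_cons, if_pos hkc, List.sum_cons, ht]
      ring
    · rw [if_neg hkc] at hw
      have := ih w hnd.2 hw
      simp only [List.map_cons, List.sum_cons, hkc, this]
      simp
      ring

lemma pvSum_insert_contains (d : PySem.Dict Char Int) (c : Char) (v w : Int)
    (hnd : d.keys.Nodup) (hw : d.get? c = some w) :
    pvSum (d.insert c v) = pvSum d - w + v := by
  have hc : d.contains c = true := by
    rcases h : d.contains c with _ | _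
    · rw [(PySem.Dict.get?_eq_none_iff_contains d c).mpr h] at hw; cases hw
    · rfl
  rw [pvSum_eq, pvSum_eq, PySem.Dict.items_insert_of_contains d v hc]
  exact pv_sum_overwrite c v d.items w hnd hw

lemma pvmod_key (T S w : Int) (hT : T = PySem.Int.mod (1 + S) pvMod) :
    PySem.Int.mod (PySem.Int.mod (2*T) pvMod - w + pvMod) pvMod
      = PySem.Int.mod (1 + (S - w + PySem.Int.mod (1 + S) pvMod)) pvMod := by
  subst hT
  simp only [PySem.Int.mod, pvMod]
  simp [Int.fmod_eq_emod]
  omega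

lemma pvmod_key2 (S : Int) :
    PySem.Int.mod (2 * PySem.Int.mod (1 + S) pvMod) pvMod
      = PySem.Int.mod (1 + (S + PySem.Int.mod (1 + S) pvMod)) pvMod := by
  simp only [PySem.Int.mod, pvMod]
  simp [Int.fmod_eq_emod]
  omega

lemma pv_getD_set_self (l : List Int) (k : Nat) (v : Int) (h : k < l.length) :
    (l.set k v).getD k 0 = v := by
  simp [List.getD, h]

lemma pv_getD_set_ne (l : List Int) (k m : Nat) (v : Int) (h : m ≠ k) :
    (l.set k v).getD m 0 = l.getD m 0 := by
  simp [List.getD, Ne.symm h]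

def pvInv (i : Nat) (dp : List Int) (lastA endB : PySem.Dict Char Int) : Prop :=
  dp.getD i 0 = PySem.Int.mod (1 + pvSum endB) pvMod
  ∧ endB.keys.Nodup
  ∧ (∀ c, lastA.contains c = endB.contains c)
  ∧ (∀ c j, lastA.get? c = some j →
      ∃ jn : Nat, j = (jn : Int) ∧ jn < i ∧ endB.get? c = some (dp.getD jn 0))

lemma pvStep_inv (c : Char) (i : Nat) (dp : List Int) (lastA endB : PySem.Dict Char Int)
    (hlen : i + 1 < dp.length) (hinv : pvInv i dp lastA endB) :
    (pvStepA (dp, lastA) ((i : Int), c)).1.length = dp.length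
    ∧ pvInv (i + 1) (pvStepA (dp, lastA) ((i : Int), c)).1
        (pvStepA (dp, lastA) ((i : Int), c)).2 (pvStepB endB c) := by
  obtain ⟨h1, h2, h3, h4⟩ := hinv
  have hcast : (i : Int) + 1 = ((i + 1 : Nat) : Int) := by push_cast; ring
  set v := PySem.Int.mod (1 + pvSum endB) pvMod with hv
  rcases hg : lastA.get? c with _ | j
  -- miss case
  · have hcont : endB.contains c = false := by
      rw [← h3]; exact (PySem.Dict.get?_eq_none_iff_contains lastA c).mp hg
    have hSum : pvSum (pvStepB endB c) = pvSum endB + v := by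
      rw [pvStepB, pvSum_insert_not_contains _ _ _ hcont]
    have hdp2 : (pvStepA (dp, lastA) ((i : Int), c)).1
        = dp.set (i + 1) (PySem.Int.mod (2 * dp.getD i 0) pvMod) := by
      simp only [pvStepA, hg, hcast, PySem.List.pySetD_natCast, PySem.List.pyGetD_natCast]
    refine ⟨by rw [hdp2]; simp, ?_, ?_, ?_, ?_⟩
    · -- h1'
      rw [hdp2, pv_getD_set_self _ _ _ hlen, hSum, h1, hv, pvmod_key2]
    · exact PySem.Dict.nodup_keys_insert _ _ _ h2
    · intro c'
      simp only [pvStepA, pvStepB, PySem.Dict.contains_insert, h3]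
    · intro c' j' hj'
      simp only [pvStepA] at hj'
      rw [PySem.Dict.get?_insert] at hj'
      by_cases hcc : c' = c
      · rw [if_pos hcc] at hj'
        obtain rfl : ((i : Int)) = j' := by simpa using hj'
        refine ⟨i, rfl, by omega, ?_⟩
        rw [pvStepB, PySem.Dict.get?_insert, if_pos hcc, hdp2,
          pv_getD_set_ne _ _ _ _ (by omega), h1]
      · rw [if_neg hcc] at hj'
        obtain ⟨jn, rfl, hlt, hgB⟩ := h4 c' j' hj'
        refine ⟨jn, rfl, by omega, ?_⟩
        rw [pvStepB, PySem.Dict.get?_insert, if_neg hcc, hgB, hdp2,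
          pv_getD_set_ne _ _ _ _ (by omega)]
  -- hit case
  · obtain ⟨jn, rfl, hlt, hgB⟩ := h4 c _ hg
    set w := dp.getD jn 0 with hw
    have hSum : pvSum (pvStepB endB c) = pvSum endB - w + v := by
      rw [pvStepB, pvSum_insert_contains _ _ _ w h2 hgB]
    have hdp1len : (dp.set (i + 1) (PySem.Int.mod (2 * dp.getD i 0) pvMod)).length = dp.length := by simp
    have hdp2 : (pvStepA (dp, lastA) ((i : Int), c)).1
        = (dp.set (i + 1) (PySem.Int.mod (2 * dp.getD i 0) pvMod)).set (i + 1)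
            (PySem.Int.mod (PySem.Int.mod (2 * dp.getD i 0) pvMod - w + pvMod) pvMod) := by
      simp only [pvStepA, hg, hcast, PySem.List.pySetD_natCast, PySem.List.pyGetD_natCast]
      rw [pv_getD_set_self _ _ _ hlen, pv_getD_set_ne _ _ _ _ (by omega)]
    refine ⟨by rw [hdp2]; simp, ?_, ?_, ?_, ?_⟩
    · -- h1'
      rw [hdp2, pv_getD_set_self _ _ _ (by omega), hSum]
      exact pvmod_key (dp.getD i 0) (pvSum endB) w (h1.trans hv)
    · exact PySem.Dict.nodup_keys_insert _ _ _ h2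
    · intro c'
      simp only [pvStepA, pvStepB, PySem.Dict.contains_insert, h3]
    · intro c' j' hj'
      simp only [pvStepA] at hj'
      rw [PySem.Dict.get?_insert] at hj'
      by_cases hcc : c' = c
      · rw [if_pos hcc] at hj'
        obtain rfl : ((i : Int)) = j' := by simpa using hj'
        refine ⟨i, rfl, by omega, ?_⟩
        rw [pvStepB, PySem.Dict.get?_insert, if_pos hcc, hdp2,
          pv_getD_set_ne _ _ _ _ (by omega), pv_getD_set_ne _ _ _ _ (by omega), h1]
      · rw [if_neg hcc] at hj'
        obtain ⟨jn', rfl, hlt', hgB'⟩ := h4 c' j' hj'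
        refine ⟨jn', rfl, by omega, ?_⟩
        rw [pvStepB, PySem.Dict.get?_insert, if_neg hcc, hgB', hdp2,
          pv_getD_set_ne _ _ _ _ (by omega), pv_getD_set_ne _ _ _ _ (by omega)]

lemma pvLoop (rest : List Char) : ∀ (i : Nat) (dp : List Int) (lastA endB : PySem.Dict Char Int),
    i + rest.length < dp.length → pvInv i dp lastA endB →
    ((PySem.List.enumerate rest (i : Int)).foldl pvStepA (dp, lastA)).1.length = dp.length
    ∧ pvInv (i + rest.length)
        ((PySem.List.enumerate rest (i : Int)).foldl pvStepA (dp, lastA)).1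
        ((PySem.List.enumerate rest (i : Int)).foldl pvStepA (dp, lastA)).2
        (rest.foldl pvStepB endB) := by
  induction rest with
  | nil => intro i dp lastA endB _ hinv; simpa [PySem.List.enumerate] using hinv
  | cons c rest' ih =>
    intro i dp lastA endB hlen hinv
    have hstep := pvStep_inv c i dp lastA endB (by simp at hlen; omega) hinv
    rw [PySem.List.enumerate_cons]
    simp only [List.foldl_cons]
    have hcast : (i : Int) + 1 = ((i + 1 : Nat) : Int) := by push_cast; ring
    rw [hcast]
    have hst : pvStepA (dp, lastA) ((i : Int), c)
        = ((pvStepA (dp, lastA) ((i : Int), c)).1, (pvStepA (dp, lastA) ((i : Int), c)).2) := rfl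
    rw [hst]
    have := ih (i + 1) (pvStepA (dp, lastA) ((i : Int), c)).1
      (pvStepA (dp, lastA) ((i : Int), c)).2 (pvStepB endB c)
      (by rw [hstep.1]; simp at hlen ⊢; omega) hstep.2
    refine ⟨by rw [this.1, hstep.1], ?_⟩
    have harith : i + (c :: rest').length = (i + 1) + rest'.length := by simp; omega
    rw [harith]
    exact this.2

lemma pvInv_init (n : Nat) :
    pvInv 0 ((List.replicate (n + 1) (0 : Int)).set 0 1) PySem.Dict.empty PySem.Dict.empty := by
  refine ⟨?_, ?_, fun c => rfl, ?_⟩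
  · rw [pv_getD_set_self _ _ _ (by simp)]
    decide
  · exact PySem.Dict.nodup_keys_empty
  · intro c j hj
    simp [PySem.Dict.get?, PySem.Dict.empty] at hj

lemma pvCount_eq (s : String) : pvCountA s = pvCountB s := by
  simp only [pvCountA, pvCountB]
  set chars := s.toList with hchars
  set n := chars.length with hn
  have hdp0 : PySem.List.pySetD (List.replicate (chars.length + 1) (0 : Int)) 0 1
      = (List.replicate (n + 1) (0 : Int)).set 0 1 := by
    rw [PySem.List.pySetD_of_nonneg _ _ (by norm_num)]
    rfl
  rw [hdp0]
  have hloop := pvLoop chars 0 ((List.replicate (n + 1) (0 : Int)).set 0 1)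
    PySem.Dict.empty PySem.Dict.empty (by simp [hn]) (pvInv_init n)
  simp only [Nat.cast_zero] at hloop
  set st := (PySem.List.enumerate chars 0).foldl pvStepA
    (((List.replicate (n + 1) (0 : Int)).set 0 1), PySem.Dict.empty) with hst
  have hlen : st.1.length = n + 1 := by rw [hloop.1]; simp
  have hne : st.1 ≠ [] := by intro h; rw [h] at hlen; simp at hlen
  have hlast : PySem.List.pyGetD st.1 (-1) 0 = st.1.getD n 0 := by
    rw [PySem.List.pyGetD_neg_one _ _ hne, List.getLast_eq_getElem,
      List.getD_eq_getElem _ _ (by omega)]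
    congr 1
    omega
  rw [hlast]
  have h1 := hloop.2.1
  simp only [Nat.zero_add] at h1
  rw [h1]

-- ===== VERDICT (by name: the statement is the Claim_ definition above) =====
theorem betterString_spec : Claim_equal_betterString := by
  intro str1 str2 _
  unfold Spec_betterString betterString betterString_alt
  rw [pvCount_eq, pvCount_eq]
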